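-- pv_equiv track=rewrite | github.com/thp/psmoveapi | python/magnetometer_proximity_ngj.py | calc_diffsums
-- ===== SOURCE A (Python) =====
-- def calc_diffsums(lastmeans, currentmeans):
--     cx, cy, cz = currentmeans
--     x, y, z = 0, 0, 0
--     for lx, ly, lz in lastmeans:
--         x += (cx-lx)
--         y += (cy-ly)
--         z += (cz-lz)
--
--     return x, y, z
-- ===== SOURCE B (Python) =====
-- def calc_diffsums(lastmeans, currentmeans):
--     cx, cy, cz = currentmeans
--     n = len(lastmeans)
--     xs, ys, zs = zip(*lastmeans) if lastmeans else ((), (), ())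
--     return n*cx - sum(xs), n*cy - sum(ys), n*cz - sum(zs)
-- ===== Notes on version B (the rewrite author's own statement) =====
-- stated objective: idiomatic
-- what changed: B replaces A's single accumulator loop with staged passes: it transposes lastmeans into its three columns with zip(*...), sums each column with sum(), and applies the identity sum(c-l) = n*c - sum(l) once per component; no per-element subtraction or hand-rolled accumulator remains.
import Mathlib
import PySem

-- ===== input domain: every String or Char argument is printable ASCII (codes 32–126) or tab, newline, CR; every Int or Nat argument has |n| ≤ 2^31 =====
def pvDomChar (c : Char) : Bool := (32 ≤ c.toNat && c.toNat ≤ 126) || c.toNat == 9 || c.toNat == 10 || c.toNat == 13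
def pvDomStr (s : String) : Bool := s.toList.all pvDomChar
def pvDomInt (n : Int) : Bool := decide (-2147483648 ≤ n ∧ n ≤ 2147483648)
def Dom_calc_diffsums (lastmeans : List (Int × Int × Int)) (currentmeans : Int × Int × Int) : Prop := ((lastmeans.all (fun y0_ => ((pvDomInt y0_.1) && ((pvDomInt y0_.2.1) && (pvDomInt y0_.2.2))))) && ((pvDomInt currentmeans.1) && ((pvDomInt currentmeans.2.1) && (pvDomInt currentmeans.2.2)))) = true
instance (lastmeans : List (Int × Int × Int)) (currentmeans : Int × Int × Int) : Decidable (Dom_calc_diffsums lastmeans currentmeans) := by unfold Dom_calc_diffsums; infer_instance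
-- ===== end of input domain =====

-- ===== PORT A =====
def calc_diffsums (lastmeans : List (Int × Int × Int)) (currentmeans : Int × Int × Int) : Int × Int × Int :=
  let cx := currentmeans.1; let cy := currentmeans.2.1; let cz := currentmeans.2.2
  lastmeans.foldl (fun (acc : Int × Int × Int) l =>
    (acc.1 + (cx - l.1), acc.2.1 + (cy - l.2.1), acc.2.2 + (cz - l.2.2))) (0, 0, 0)

-- ===== PORT B =====
-- B: transpose into the three columns (zip(*lastmeans)), sum each column, then n*c - sum once per component.
def calc_diffsums_alt (lastmeans : List (Int × Int × Int)) (currentmeans : Int × Int × Int) : Int × Int × Int :=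
  let cx := currentmeans.1; let cy := currentmeans.2.1; let cz := currentmeans.2.2
  let n : Int := lastmeans.length
  let xs := lastmeans.map (fun l => l.1)
  let ys := lastmeans.map (fun l => l.2.1)
  let zs := lastmeans.map (fun l => l.2.2)
  (n * cx - xs.sum, n * cy - ys.sum, n * cz - zs.sum)

-- ===== PRECONDITION & SPEC =====
def Spec_calc_diffsums (lastmeans : List (Int × Int × Int)) (currentmeans : Int × Int × Int) (out : Int × Int × Int) : Prop := out = calc_diffsums_alt lastmeans currentmeans
instance (lastmeans : List (Int × Int × Int)) (currentmeans : Int × Int × Int) (out : Int × Int × Int) : Decidable (Spec_calc_diffsums lastmeans currentmeans out) := by unfold Spec_calc_diffsums; infer_instance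

-- ===== CLAIM (what is proved, stated in full; the proofs are below) =====
def Claim_equal_calc_diffsums : Prop := ∀ (lastmeans : List (Int × Int × Int)) (currentmeans : Int × Int × Int), Dom_calc_diffsums lastmeans currentmeans → Spec_calc_diffsums lastmeans currentmeans (calc_diffsums lastmeans currentmeans)

-- ===== LEMMAS AND PROOFS =====
-- Loop invariant: A's fold from any accumulator adds (n*c - column sum) per component.
theorem foldl_diff_eq (l : List (Int × Int × Int)) (cx cy cz : Int) (acc : Int × Int × Int) :
    l.foldl (fun (a : Int × Int × Int) p =>
      (a.1 + (cx - p.1), a.2.1 + (cy - p.2.1), a.2.2 + (cz - p.2.2))) acc =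
    (acc.1 + ((l.length : Int) * cx - (l.map (fun p => p.1)).sum),
     acc.2.1 + ((l.length : Int) * cy - (l.map (fun p => p.2.1)).sum),
     acc.2.2 + ((l.length : Int) * cz - (l.map (fun p => p.2.2)).sum)) := by
  induction l generalizing acc with
  | nil => simp
  | cons h t ih =>
    simp only [List.foldl_cons, List.length_cons, List.map_cons, List.sum_cons]
    rw [ih]
    push_cast
    refine Prod.ext (by ring) (Prod.ext (by ring) (by ring))

-- ===== VERDICT (by name: the statement is the Claim_ definition above) =====
theorem calc_diffsums_spec : Claim_equal_calc_diffsums := by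
  intro lastmeans currentmeans _
  unfold Spec_calc_diffsums calc_diffsums calc_diffsums_alt
  rw [foldl_diff_eq]
  simp
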